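-- pv_equiv track=rewrite | github.com/Sonnenhut/aoc2020 | day20.py | overlap_at
-- ===== SOURCE A (Python) =====
-- def overlap_at(image, overlay, x, y):
--     res = [list(line) for line in image]
--     overlay_h = len(overlay)
--     overlay_w = len(overlay[0])
--     for oy in range(0, overlay_h):
--         for ox in range(0, overlay_w):
--             original = image[y + oy][x + ox]
--             to_set = overlay[oy][ox]
--
--             if to_set == ' ':
--                 newv = original
--             elif to_set == '#' and original == '#':
--                 newv = 'O'
--             else:
--                 # cannot place overlay!
--                 return None
--
--             res[y + oy][x + ox] = newv
--
--     return res
-- ===== SOURCE B (Python) =====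
-- def overlap_at(image, overlay, x, y):
--     # validation pass (same row-major scan as placement): no grid is built on failure
--     h, w = len(overlay), len(overlay[0])
--     for oy in range(h):
--         for ox in range(w):
--             cell = image[y + oy][x + ox]
--             t = overlay[oy][ox]
--             if t != ' ' and not (t == '#' and cell == '#'):
--                 return None
--     # build pass: '#' marks 'O', any other overlay cell keeps the image pixel
--     res = [list(line) for line in image]
--     for oy in range(h):
--         for ox in range(w):
--             res[y + oy][x + ox] = 'O' if overlay[oy][ox] == '#' else image[y + oy][x + ox]
--     return res
-- ===== Notes on version B (the rewrite author's own statement) =====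
-- stated objective: simpler
-- what changed: B splits A's single copy-and-write-while-checking pass into a pure validation pass over the overlay cells followed by a build pass that copies the image and fills each covered cell from the overlay, so no partial copy is ever built on failure.
import Mathlib
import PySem

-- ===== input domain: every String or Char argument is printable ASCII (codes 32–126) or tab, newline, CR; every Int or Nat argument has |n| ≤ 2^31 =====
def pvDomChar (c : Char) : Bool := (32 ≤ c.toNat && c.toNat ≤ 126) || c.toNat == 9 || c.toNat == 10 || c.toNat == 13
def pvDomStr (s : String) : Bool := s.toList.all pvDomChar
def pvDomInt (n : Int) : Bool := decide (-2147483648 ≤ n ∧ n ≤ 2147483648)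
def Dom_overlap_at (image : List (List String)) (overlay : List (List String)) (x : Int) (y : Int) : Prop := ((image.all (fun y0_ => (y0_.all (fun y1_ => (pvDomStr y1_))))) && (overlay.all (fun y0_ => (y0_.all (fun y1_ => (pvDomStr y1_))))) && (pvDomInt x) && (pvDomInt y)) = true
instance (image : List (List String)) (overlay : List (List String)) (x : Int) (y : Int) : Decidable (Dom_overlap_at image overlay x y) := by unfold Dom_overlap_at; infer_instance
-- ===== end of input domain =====

-- B separates the conflict check from grid construction (a pure validation pass, then a build
-- pass that copies the image and fills each covered cell) instead of A's single pass that
-- copies and writes every cell while it checks; objective: simpler decomposition, no partial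
-- copy is built on failure.

-- `lst[i][j] = v` (shared indexing primitive for both ports; Python wrap rule via pyGet?/pySet?)
def pvSetCell (res : List (List String)) (i j : Int) (v : String) : List (List String) :=
  match PySem.List.pyGet? res i with
  | none => res
  | some row =>
    match PySem.List.pySet? row j v with
    | none => res
    | some row' => PySem.List.pySetD res i row'

-- ===== PORT A =====
-- loop body of A: read image[y+oy][x+ox] (none = IndexError), read overlay[oy][ox],
-- branch exactly as A, write res cell (' ' rewrites the original, '#'+'#' writes 'O')
def pvCellA (image : List (List String)) (overlay : List (List String)) (x : Int) (y : Int)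
    (res : List (List String)) (oy ox : Nat) : Option (List (List String)) :=
  match (PySem.List.pyGet? image (y + (oy : Int))).bind
          (fun r => PySem.List.pyGet? r (x + (ox : Int))) with
  | none => none
  | some original =>
    match PySem.List.pyGet? (overlay.getD oy []) ((ox : Int)) with
    | none => none
    | some to_set =>
      if to_set = " " then some (pvSetCell res (y + (oy : Int)) (x + (ox : Int)) original)
      else if to_set = "#" ∧ original = "#" then
        some (pvSetCell res (y + (oy : Int)) (x + (ox : Int)) "O")
      else none

def overlap_at (image : List (List String)) (overlay : List (List String)) (x : Int) (y : Int) : Option (List (List String)) :=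
  -- res = [list(line) for line in image]  (a value-equal copy)
  let res := image.map (fun line => line)
  match PySem.List.pyGet? overlay 0 with   -- overlay[0] (none = IndexError)
  | none => none
  | some row0 =>
    (List.range overlay.length).foldl (fun acc oy =>
      (List.range row0.length).foldl (fun acc2 ox =>
        acc2.bind (fun r => pvCellA image overlay x y r oy ox)) acc) (some res)

-- ===== PORT B =====
-- B's validation check for one overlay cell: both reads succeed (none = IndexError in Source B)
-- and the Source B failure test  t != ' ' and not (t == '#' and cell == '#')  does NOT fire
def pvOkB (image : List (List String)) (overlay : List (List String)) (x : Int) (y : Int)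
    (oy ox : Nat) : Bool :=
  match (PySem.List.pyGet? image (y + (oy : Int))).bind
          (fun r => PySem.List.pyGet? r (x + (ox : Int))),
        PySem.List.pyGet? (overlay.getD oy []) ((ox : Int)) with
  | some cell, some t => t == " " || (t == "#" && cell == "#")
  | _, _ => false

-- B's build step for one overlay cell: 'O' if the overlay is '#', else the image pixel
-- (pyGetD is exact here: the validation pass already performed both reads successfully)
def pvBuildB (image : List (List String)) (overlay : List (List String)) (x : Int) (y : Int)
    (res : List (List String)) (oy ox : Nat) : List (List String) :=
  pvSetCell res (y + (oy : Int)) (x + (ox : Int))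
    (if (overlay.getD oy []).getD ox "" == "#" then "O"
     else PySem.List.pyGetD (PySem.List.pyGetD image (y + (oy : Int)) []) (x + (ox : Int)) "")

def overlap_at_alt (image : List (List String)) (overlay : List (List String)) (x : Int) (y : Int) : Option (List (List String)) :=
  match PySem.List.pyGet? overlay 0 with   -- overlay[0] (none = IndexError)
  | none => none
  | some row0 =>
    if (List.range overlay.length).all (fun oy =>
         (List.range row0.length).all (fun ox => pvOkB image overlay x y oy ox))
    then
      -- res = [list(line) for line in image] is a value-equal copy of image
      some ((List.range overlay.length).foldl (fun res oy =>
        (List.range row0.length).foldl (fun res2 ox =>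
          pvBuildB image overlay x y res2 oy ox) res) image)
    else none

-- ===== PRECONDITION & SPEC =====
-- both reads A performs at overlay cell (oy, ox) are in range (Python's negative-index rule)
def pvRead (image : List (List String)) (overlay : List (List String)) (x : Int) (y : Int) (oy ox : Nat) : Bool :=
  decide (ox < (overlay.getD oy []).length) &&
  decide (-(image.length : Int) ≤ y + (oy : Int) ∧ y + (oy : Int) < (image.length : Int)) &&
  decide (-((PySem.List.pyGetD image (y + (oy : Int)) []).length : Int) ≤ x + (ox : Int) ∧
          x + (ox : Int) < ((PySem.List.pyGetD image (y + (oy : Int)) []).length : Int))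

-- overlay cell (oy, ox) is readable and cannot be placed (neither ' ' nor a matching '#')
def pvConflict (image : List (List String)) (overlay : List (List String)) (x : Int) (y : Int) (oy ox : Nat) : Bool :=
  pvRead image overlay x y oy ox &&
  ((overlay.getD oy []).getD ox "" != " ") &&
  !(((overlay.getD oy []).getD ox "" == "#") &&
    (PySem.List.pyGetD (PySem.List.pyGetD image (y + (oy : Int)) []) (x + (ox : Int)) "" == "#"))

-- Pre_ excludes exactly the inputs on which A raises IndexError: an empty overlay
-- (overlay[0]), or an out-of-range read of image[y+oy][x+ox] or overlay[oy][ox] reached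
-- before any conflict stops the scan; everywhere A returns (a grid or None), Pre_ holds.
def Pre_overlap_at (image : List (List String)) (overlay : List (List String)) (x : Int) (y : Int) : Prop :=
  overlay ≠ [] ∧
  ((∀ oy < overlay.length, ∀ ox < (overlay.headD []).length, pvRead image overlay x y oy ox = true) ∨
    (∃ oy < overlay.length, ∃ ox < (overlay.headD []).length,
      pvConflict image overlay x y oy ox = true ∧
      ∀ oy' < overlay.length, ∀ ox' < (overlay.headD []).length,
        (oy' < oy ∨ (oy' = oy ∧ ox' < ox)) → pvRead image overlay x y oy' ox' = true))
instance (image : List (List String)) (overlay : List (List String)) (x : Int) (y : Int) : Decidable (Pre_overlap_at image overlay x y) := by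
  unfold Pre_overlap_at; infer_instance

def pvWitness_overlap_at : List (List String) × List (List String) × Int × Int :=
  ([["#", "."], [".", "#"]], [["#", " "], [" ", "#"]], 0, 0)

def Spec_overlap_at (image : List (List String)) (overlay : List (List String)) (x : Int) (y : Int) (out : Option (List (List String))) : Prop := out = overlap_at_alt image overlay x y
instance (image : List (List String)) (overlay : List (List String)) (x : Int) (y : Int) (out : Option (List (List String))) : Decidable (Spec_overlap_at image overlay x y out) := by unfold Spec_overlap_at; infer_instance

-- ===== CLAIM (what is proved, stated in full; the proofs are below) =====
def Claim_equal_overlap_at : Prop := ∀ (image : List (List String)) (overlay : List (List String)) (x : Int) (y : Int), Dom_overlap_at image overlay x y → Pre_overlap_at image overlay x y → Spec_overlap_at image overlay x y (overlap_at image overlay x y)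

-- ===== LEMMAS AND PROOFS =====

theorem pvWitness_ok :
    Dom_overlap_at pvWitness_overlap_at.1 pvWitness_overlap_at.2.1 pvWitness_overlap_at.2.2.1 pvWitness_overlap_at.2.2.2 ∧
    Pre_overlap_at pvWitness_overlap_at.1 pvWitness_overlap_at.2.1 pvWitness_overlap_at.2.2.1 pvWitness_overlap_at.2.2.2 := by
  decide

-- a fold with Option.bind started from none stays none
theorem pv_foldl_obind_none {α β : Type} (l : List β) (f : β → α → Option α) :
    l.foldl (fun acc z => acc.bind (f z)) none = none := by
  induction l with
  | nil => rfl
  | cons z l ih => simpa using ih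

-- generic split of an early-exit Option fold into a check pass and a build pass
theorem pv_foldl_obind_split {α β : Type} (l : List β) (f : β → α → Option α)
    (g : β → α → α) (p : β → Bool)
    (hsome : ∀ z ∈ l, ∀ a, p z = true → f z a = some (g z a))
    (hnone : ∀ z ∈ l, ∀ a, p z = false → f z a = none) :
    ∀ a, l.foldl (fun acc z => acc.bind (f z)) (some a)
      = if l.all p then some (l.foldl (fun acc z => g z acc) a) else none := by
  induction l with
  | nil => intro a; simp
  | cons z l ih =>
    intro a
    by_cases hp : p z = true
    · have hf := hsome z (by simp) a hp
      have := ih (fun w hw => hsome w (by simp [hw])) (fun w hw => hnone w (by simp [hw])) (g z a)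
      simp [List.foldl_cons, hf, hp, this]
    · have hf := hnone z (by simp) a (by simpa using hp)
      simp [List.foldl_cons, hf, pv_foldl_obind_none, hp]

-- A's per-cell step succeeds and performs exactly B's build write when the check passes
theorem pv_step_some (image : List (List String)) (overlay : List (List String)) (x y : Int)
    (oy ox : Nat) (a : List (List String)) (hp : pvOkB image overlay x y oy ox = true) :
    pvCellA image overlay x y a oy ox = some (pvBuildB image overlay x y a oy ox) := by
  unfold pvOkB at hp
  unfold pvCellA pvBuildB
  split at hp
  case _ cell t hi ho =>
    rw [hi, ho]
    dsimp only
    simp only [Bool.or_eq_true, Bool.and_eq_true, beq_iff_eq] at hp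
    -- the two getD reads equal the successful pyGet? results
    have hgetD : (overlay.getD oy []).getD ox "" = t := by
      rw [PySem.List.pyGet?_natCast] at ho
      rw [List.getD_eq_getElem?_getD, ho]; rfl
    obtain ⟨row, hrow, hcellr⟩ := Option.bind_eq_some_iff.mp hi
    have hrowD : PySem.List.pyGetD image (y + (oy : Int)) [] = row := by
      unfold PySem.List.pyGetD; rw [hrow]; rfl
    have hcellD : PySem.List.pyGetD (PySem.List.pyGetD image (y + (oy : Int)) []) (x + (ox : Int)) "" = cell := by
      rw [hrowD]; unfold PySem.List.pyGetD; rw [hcellr]; rfl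
    rcases hp with ht | ⟨ht, hc⟩
    · subst ht
      rw [if_pos rfl, hgetD]
      have hne : (" " == "#") = false := by decide
      rw [hne, if_neg (by simp : ¬(false = true)), hcellD]
    · subst ht
      rw [if_neg (by decide), if_pos ⟨rfl, hc⟩, hgetD]
      simp
  case _ =>
    exact absurd hp (by simp)

-- A's per-cell step returns None exactly when B's check fails (bad read or conflict)
theorem pv_step_none (image : List (List String)) (overlay : List (List String)) (x y : Int)
    (oy ox : Nat) (a : List (List String)) (hp : pvOkB image overlay x y oy ox = false) :
    pvCellA image overlay x y a oy ox = none := by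
  unfold pvOkB at hp
  unfold pvCellA
  cases hi : (PySem.List.pyGet? image (y + (oy : Int))).bind
      (fun r => PySem.List.pyGet? r (x + (ox : Int))) with
  | none => rfl
  | some cell =>
    cases ho : PySem.List.pyGet? (overlay.getD oy []) ((ox : Int)) with
    | none => rfl
    | some t =>
      rw [hi, ho] at hp
      dsimp only at hp ⊢
      simp only [Bool.or_eq_false_iff, Bool.and_eq_false_iff, beq_eq_false_iff_ne] at hp
      obtain ⟨ht, hc⟩ := hp
      rw [if_neg ht, if_neg]
      rintro ⟨h1, h2⟩
      rcases hc with h | h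
      · exact h h1
      · exact h h2

-- row-major cell list: flattening of the two nested loops both ports run
def pvCells (H W : Nat) : List (Nat × Nat) :=
  (List.range H).flatMap (fun oy => (List.range W).map (fun ox => (oy, ox)))

theorem overlap_at_spec : Claim_equal_overlap_at := by
  intro image overlay x y _ hpre
  obtain ⟨h0, _⟩ := hpre
  unfold Spec_overlap_at overlap_at overlap_at_alt
  have hhead : PySem.List.pyGet? overlay 0 = some (overlay.headD []) := by
    cases overlay with
    | nil => exact absurd rfl h0
    | cons h t => simp
  rw [hhead]
  dsimp only
  rw [show (image.map fun line => line) = image from by simp]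
  -- flatten both nested folds / alls to the row-major cell list
  have eA : (pvCells overlay.length (overlay.headD []).length).foldl
        (fun acc z => acc.bind (fun r => pvCellA image overlay x y r z.1 z.2)) (some image)
      = (List.range overlay.length).foldl (fun acc oy =>
          (List.range (overlay.headD []).length).foldl
            (fun acc2 ox => acc2.bind (fun r => pvCellA image overlay x y r oy ox)) acc)
          (some image) := by
    rw [pvCells, List.foldl_flatMap]
    simp only [List.foldl_map]
  have eAll : (pvCells overlay.length (overlay.headD []).length).all
        (fun z => pvOkB image overlay x y z.1 z.2)
      = (List.range overlay.length).all (fun oy =>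
          (List.range (overlay.headD []).length).all
            (fun ox => pvOkB image overlay x y oy ox)) := by
    rw [pvCells, List.all_flatMap]
    simp only [List.all_map, Function.comp_def]
  have eB : (pvCells overlay.length (overlay.headD []).length).foldl
        (fun acc z => pvBuildB image overlay x y acc z.1 z.2) image
      = (List.range overlay.length).foldl (fun res oy =>
          (List.range (overlay.headD []).length).foldl
            (fun res2 ox => pvBuildB image overlay x y res2 oy ox) res) image := by
    rw [pvCells, List.foldl_flatMap]
    simp only [List.foldl_map]
  have key := pv_foldl_obind_split (pvCells overlay.length (overlay.headD []).length)
      (fun z a => pvCellA image overlay x y a z.1 z.2)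
      (fun z a => pvBuildB image overlay x y a z.1 z.2)
      (fun z => pvOkB image overlay x y z.1 z.2)
      (fun z _ a hp => pv_step_some image overlay x y z.1 z.2 a hp)
      (fun z _ a hp => pv_step_none image overlay x y z.1 z.2 a hp)
      image
  rw [← eA, key, eAll, eB]
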